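-- pv_equiv track=rewrite | github.com/Chasesc/advent-of-code-2023 | day3.py | extract_numbers_and_bounds
-- ===== SOURCE A (Python) =====
-- from typing import Final, Iterator
--
-- def extract_numbers_and_bounds(
--     engine_row: list[str],
-- ) -> Iterator[tuple[int, tuple[int, int]]]:
--     # [".", "4", "2", ".", "5", "."]
--     # extracts [(42, (1, 2)), (5, (4, 4))]
--
--     start_idx: int | None = None
--     for idx, char in enumerate(engine_row):
--         if char.isdigit():
--             if start_idx is None:
--                 start_idx = idx
--         elif start_idx is not None:
--             digit = int("".join(engine_row[start_idx:idx]))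
--             yield (digit, (start_idx, idx - 1))
--             start_idx = None
--
--     if start_idx is not None:
--         digit = int("".join(engine_row[start_idx:]))
--         yield (digit, (start_idx, len(engine_row) - 1))
-- ===== SOURCE B (Python) =====
-- def extract_numbers_and_bounds(engine_row):
--     # Staged boundary-detection approach: a number starts at a digit with no digit
--     # before it and ends at a digit with no digit after it; starts and ends pair
--     # up in order, and each pair's slice gives the number.
--     n = len(engine_row)
--     isd = [c.isdigit() for c in engine_row]
--     starts = [i for i in range(n) if isd[i] and (i == 0 or not isd[i - 1])]
--     ends = [i for i in range(n) if isd[i] and (i == n - 1 or not isd[i + 1])]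
--     for s, e in zip(starts, ends):
--         yield (int("".join(engine_row[s:e + 1])), (s, e))
-- ===== Notes on version B (the rewrite author's own statement) =====
-- stated objective: alternative
-- what changed: Replaces A's single-pass start_idx state machine (with its post-loop flush) by staged passes: compute an isdigit mask, collect run-start and run-end indices by neighbour tests over the index range, zip them into bounds and slice each number out.
import Mathlib
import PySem

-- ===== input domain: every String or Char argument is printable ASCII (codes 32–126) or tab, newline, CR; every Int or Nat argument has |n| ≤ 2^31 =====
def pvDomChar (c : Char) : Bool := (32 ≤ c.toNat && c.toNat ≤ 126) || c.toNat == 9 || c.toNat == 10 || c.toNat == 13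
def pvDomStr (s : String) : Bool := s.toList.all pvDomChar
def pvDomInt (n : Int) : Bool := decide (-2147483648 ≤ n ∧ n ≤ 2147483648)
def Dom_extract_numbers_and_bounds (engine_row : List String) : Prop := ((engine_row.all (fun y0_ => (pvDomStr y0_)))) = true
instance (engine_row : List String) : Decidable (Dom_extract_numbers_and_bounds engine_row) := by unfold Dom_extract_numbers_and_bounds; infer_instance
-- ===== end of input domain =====

-- B replaces A's single-pass start_idx state machine (with its post-loop flush) by staged passes:
-- an isdigit mask, run-start and run-end indices found by neighbour tests, zipped into bounds.
-- Objective: alternative decomposition, same O(n) cost.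

-- int("".join(parts)); on every call site the parts are a nonempty all-digit run, so ofStr? is some
-- and the 0 default is never used (shared helper: both sources call int("".join(...))).
def pvNum (parts : List String) : Int := (PySem.Int.ofStr? (PySem.Str.join "" parts)).getD 0

-- ===== PORT A =====
-- the loop body: state (yielded list, start_idx)
def pvStepA (engine_row : List String) (st : List (Int × (Int × Int)) × Option Int)
    (p : Int × String) : List (Int × (Int × Int)) × Option Int :=
  if PySem.Str.strIsdigit p.2 then
    (st.1, match st.2 with | none => some p.1 | some s => some s)
  else
    match st.2 with
    | some s => (st.1 ++ [(pvNum (PySem.List.slice engine_row (some s) (some p.1)), (s, p.1 - 1))], none)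
    | none => (st.1, none)

def extract_numbers_and_bounds (engine_row : List String) : List (Int × (Int × Int)) :=
  let r := (PySem.List.enumerate engine_row 0).foldl (pvStepA engine_row) ([], none)
  match r.2 with
  | some s => r.1 ++ [(pvNum (PySem.List.slice engine_row (some s) none), (s, (engine_row.length : Int) - 1))]
  | none => r.1

-- ===== PORT B =====
-- isd[i] for a nonnegative index; the .getD false default is unreachable in the port because
-- Python's short-circuit `or` only reads isd[i-1] / isd[i+1] at in-range indices.
def pvIsdAt (isd : List Bool) (i : Int) : Bool := (PySem.List.pyGet? isd i).getD false

def extract_numbers_and_bounds_alt (engine_row : List String) : List (Int × (Int × Int)) :=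
  let n : Int := engine_row.length
  let isd : List Bool := engine_row.map (fun c => PySem.Str.strIsdigit c)
  let starts := (PySem.List.pyRange 0 n 1).filter
    (fun i => pvIsdAt isd i && (i == 0 || !pvIsdAt isd (i - 1)))
  let ends := (PySem.List.pyRange 0 n 1).filter
    (fun i => pvIsdAt isd i && (i == n - 1 || !pvIsdAt isd (i + 1)))
  (starts.zip ends).map
    (fun p => (pvNum (PySem.List.slice engine_row (some p.1) (some (p.2 + 1))), (p.1, p.2)))

-- ===== PRECONDITION & SPEC =====
def Spec_extract_numbers_and_bounds (engine_row : List String) (out : List (Int × (Int × Int))) : Prop := out = extract_numbers_and_bounds_alt engine_row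
instance (engine_row : List String) (out : List (Int × (Int × Int))) : Decidable (Spec_extract_numbers_and_bounds engine_row out) := by unfold Spec_extract_numbers_and_bounds; infer_instance

-- ===== CLAIM (what is proved, stated in full; the proofs are below) =====
def Claim_equal_extract_numbers_and_bounds : Prop := ∀ (engine_row : List String), Dom_extract_numbers_and_bounds engine_row → Spec_extract_numbers_and_bounds engine_row (extract_numbers_and_bounds engine_row)

-- ===== LEMMAS AND PROOFS =====

def pvDg (t : String) : Bool := PySem.Str.strIsdigit t

-- the common intermediate: the list of maximal digit runs of the row, as (number, (start, end))
def pvRuns : List String → Int → List (Int × (Int × Int))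
  | [], _ => []
  | c :: l, i =>
    if pvDg c then
      (pvNum (c :: l.takeWhile pvDg), (i, i + ((l.takeWhile pvDg).length : Int)))
        :: pvRuns (l.dropWhile pvDg) (i + ((l.takeWhile pvDg).length : Int) + 1)
    else pvRuns l (i + 1)
termination_by l _ => l.length
decreasing_by all_goals { have := List.length_dropWhile_le pvDg l; simp only [List.length_cons]; omega }

-- the post-loop flush of port A, isolated for the invariant proofs
def pvFlush (row : List String) (r : List (Int × (Int × Int)) × Option Int) : List (Int × (Int × Int)) :=
  match r.2 with
  | some s => r.1 ++ [(pvNum (PySem.List.slice row (some s) none), (s, (row.length : Int) - 1))]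
  | none => r.1

theorem pvDropWhile_eq_drop {α : Type} (p : α → Bool) :
    ∀ (l : List α), l.dropWhile p = l.drop (l.takeWhile p).length := by
  intro l
  induction l with
  | nil => rfl
  | cons c l' ih =>
    cases h : p c
    · rw [List.dropWhile_cons_of_neg (by simp [h]), List.takeWhile_cons_of_neg (by simp [h])]
      rfl
    · rw [List.dropWhile_cons_of_pos (by simp [h]), List.takeWhile_cons_of_pos (by simp [h])]
      simpa using ih

theorem pvTakeWhile_len_le {α : Type} (p : α → Bool) (l : List α) :
    (l.takeWhile p).length ≤ l.length :=
  (List.takeWhile_sublist p).length_le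

theorem pvTakeWhile_eq_take {α : Type} (p : α → Bool) (l : List α) :
    l.takeWhile p = l.take (l.takeWhile p).length :=
  List.prefix_iff_eq_take.mp (List.takeWhile_prefix p)

-- chars of a digit run, read off the full row by an absolute slice
theorem pvSliceRun (row : List String) (i : Nat) (c : String) (l : List String)
    (hdrop : row.drop i = c :: l) :
    PySem.List.slice row (some (i : Int))
        (some ((i : Int) + ((l.takeWhile pvDg).length : Int) + 1))
      = c :: l.takeWhile pvDg := by
  rw [show (i : Int) + ((l.takeWhile pvDg).length : Int) + 1
        = ((i + ((l.takeWhile pvDg).length + 1) : Nat) : Int) from by push_cast; ring]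
  rw [PySem.List.slice_natCast]
  rw [show i + ((l.takeWhile pvDg).length + 1) - i = (l.takeWhile pvDg).length + 1 from by omega]
  rw [hdrop, List.take_succ_cons]
  rw [← pvTakeWhile_eq_take]

-- ===== A-side: the state machine computes pvRuns =====
set_option maxHeartbeats 1000000 in
theorem pvLoopA (row : List String) : ∀ (l : List String) (i : Nat), row.drop i = l → i ≤ row.length →
    (∀ acc, pvFlush row ((PySem.List.enumerate l (i : Int)).foldl (pvStepA row) (acc, none))
        = acc ++ pvRuns l (i : Int))
    ∧ (∀ acc (s : Nat),
        pvFlush row ((PySem.List.enumerate l (i : Int)).foldl (pvStepA row) (acc, some (s : Int)))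
        = acc ++ (pvNum (PySem.List.slice row (some (s : Int))
                    (some ((i + (l.takeWhile pvDg).length : Nat) : Int))),
                  ((s : Int), ((i + (l.takeWhile pvDg).length : Nat) : Int) - 1))
            :: pvRuns (l.dropWhile pvDg) ((i + (l.takeWhile pvDg).length : Nat) : Int)) := by
  intro l
  induction l with
  | nil =>
    intro i hdrop hle
    have hn : i = row.length := by
      have := List.drop_eq_nil_iff.mp hdrop
      omega
    constructor
    · intro acc
      simp [PySem.List.enumerate_nil, pvFlush, pvRuns]
    · intro acc s
      simp only [PySem.List.enumerate_nil, List.foldl_nil, pvFlush, List.takeWhile_nil,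
        List.dropWhile_nil, List.length_nil, Nat.add_zero, pvRuns]
      rw [PySem.List.slice_from_natCast, PySem.List.slice_natCast]
      rw [List.take_of_length_le (by simp; omega)]
      simp [hn]
  | cons c l' ih =>
    intro i hdrop hle
    have hlt : i < row.length := by
      by_contra h
      rw [List.drop_eq_nil_iff.mpr (by omega)] at hdrop
      exact List.cons_ne_nil _ _ hdrop.symm
    have hdrop' : row.drop (i + 1) = l' := by
      rw [← List.tail_drop, hdrop]; rfl
    have ih' := ih (i + 1) hdrop' (by omega)
    constructor
    · -- state none
      intro acc
      rw [PySem.List.enumerate_cons, List.foldl_cons]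
      cases hd : pvDg c
      · -- non-digit head: nothing happens on both sides
        have hstep : pvStepA row (acc, none) ((i : Int), c) = (acc, none) := by
          simp [pvStepA, pvDg] at hd ⊢; simp [hd]
        rw [hstep]
        have h1 := ih'.1 acc
        push_cast at h1
        rw [h1, pvRuns]
        simp [hd]
      · -- digit head: A opens a run at i
        have hstep : pvStepA row (acc, none) ((i : Int), c) = (acc, some (i : Int)) := by
          simp [pvStepA, pvDg] at hd ⊢; simp [hd]
        rw [hstep]
        have h2 := ih'.2 acc i
        push_cast at h2
        rw [h2, pvRuns]
        simp only [hd, if_pos]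
        rw [show (i : Int) + 1 + ((l'.takeWhile pvDg).length : Int)
              = (i : Int) + ((l'.takeWhile pvDg).length : Int) + 1 from by ring,
            pvSliceRun row i c l' hdrop]
        norm_num
    · -- state some s
      intro acc s
      rw [PySem.List.enumerate_cons, List.foldl_cons]
      cases hd : pvDg c
      · -- non-digit head: A flushes the pending run here
        have hstep : pvStepA row (acc, some (s : Int)) ((i : Int), c)
            = (acc ++ [(pvNum (PySem.List.slice row (some (s : Int)) (some (i : Int))), ((s : Int), (i : Int) - 1))], none) := by
          simp [pvStepA, pvDg] at hd ⊢; simp [hd]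
        rw [hstep]
        have h1 := ih'.1 (acc ++ [(pvNum (PySem.List.slice row (some (s : Int)) (some (i : Int))), ((s : Int), (i : Int) - 1))])
        push_cast at h1
        rw [h1]
        rw [List.takeWhile_cons_of_neg (by simp [hd]), List.dropWhile_cons_of_neg (by simp [hd])]
        simp only [List.length_nil, Nat.add_zero, List.append_assoc, List.singleton_append]
        congr 2
        rw [pvRuns]
        simp [hd]
      · -- digit head: the pending run continues
        have hstep : pvStepA row (acc, some (s : Int)) ((i : Int), c) = (acc, some (s : Int)) := by
          simp [pvStepA, pvDg] at hd ⊢; simp [hd]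
        rw [hstep]
        have h2 := ih'.2 acc s
        push_cast at h2
        rw [h2]
        rw [List.takeWhile_cons_of_pos (by simp [hd]), List.dropWhile_cons_of_pos (by simp [hd])]
        simp only [List.length_cons]
        push_cast
        ring_nf

theorem pvA_eq_runs (row : List String) :
    extract_numbers_and_bounds row = pvRuns row 0 := by
  have h := (pvLoopA row row 0 (by simp) (by simp)).1 []
  rw [show ((0 : Nat) : Int) = (0 : Int) from rfl] at h
  unfold extract_numbers_and_bounds
  simpa [pvFlush] using h

-- ===== B-side: index-mask lookups =====
theorem pvIsdAt_lt (row : List String) (j : Nat) (h : j < row.length) :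
    pvIsdAt (row.map (fun c => PySem.Str.strIsdigit c)) (j : Int) = pvDg row[j] := by
  unfold pvIsdAt pvDg
  rw [PySem.List.pyGet?_natCast]
  simp [List.getElem?_map, List.getElem?_eq_getElem h]

-- drop a block of indices on which the predicate is false from a filtered range
theorem pvPeel (p : Int → Bool) : ∀ (k : Nat) (a b : Int),
    (∀ t : Nat, t < k → p (a + t) = false) →
    (PySem.List.pyRange a b 1).filter p = (PySem.List.pyRange (a + k) b 1).filter p := by
  intro k
  induction k with
  | zero => intro a b _; simp
  | succ k ihk =>
    intro a b hp
    by_cases hab : a < b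
    · rw [PySem.List.pyRange_one_cons hab, List.filter_cons_of_neg (by simpa using hp 0 (by omega))]
      rw [ihk (a + 1) b (fun t ht => by
        have he : a + 1 + (t : Int) = a + (((t + 1 : Nat)) : Int) := by push_cast; ring
        rw [he]
        exact hp (t + 1) (by omega))]
      congr 1
      push_cast
      ring
    · rw [PySem.List.pyRange_one_eq_nil (by omega), PySem.List.pyRange_one_eq_nil (by push_cast; omega)]

theorem pvTakeWhile_pred {α : Type} (p : α → Bool) :
    ∀ (l : List α) (t : Nat) (h : t < (l.takeWhile p).length),
      p (l[t]'(lt_of_lt_of_le h (pvTakeWhile_len_le p l))) = true := by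
  intro l
  induction l with
  | nil => intro t h; simp at h
  | cons a l ih =>
    intro t h
    cases ha : p a
    · rw [List.takeWhile_cons_of_neg (by simp [ha])] at h
      simp at h
    · cases t with
      | zero => simpa using ha
      | succ t =>
        rw [List.takeWhile_cons_of_pos (by simp [ha])] at h
        simp only [List.length_cons] at h
        simpa using ih t (by omega)

theorem pvGetOfDrop (row : List String) (i : Nat) (c : String) (l : List String)
    (hdrop : row.drop i = c :: l) (h : i < row.length) : row[i] = c := by
  have h9 : row[i + 0]? = (c :: l)[0]? := by rw [← List.getElem?_drop, hdrop]
  simp only [Nat.add_zero, List.getElem?_cons_zero] at h9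
  rw [List.getElem?_eq_getElem h] at h9
  exact Option.some.inj h9

-- every position of the head digit run is a digit in the mask
theorem pvRunDigit (row : List String) (i : Nat) (c : String) (l : List String)
    (hdrop : row.drop i = c :: l) (hd : pvDg c = true) (t : Nat)
    (ht : t ≤ (l.takeWhile pvDg).length) :
    pvIsdAt (row.map (fun c => PySem.Str.strIsdigit c)) ((i + t : Nat) : Int) = true := by
  have hlen : (c :: l).length = row.length - i := by rw [← hdrop, List.length_drop]
  have htw := pvTakeWhile_len_le pvDg l
  have hjlt : i + t < row.length := by simp at hlen; omega
  rw [pvIsdAt_lt row (i + t) hjlt]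
  have h9 : row[i + t]? = (c :: l)[t]? := by rw [← List.getElem?_drop, hdrop]
  have hget : row[i + t] = (c :: l)[t]'(by simp; omega) := by
    rw [List.getElem?_eq_getElem hjlt, List.getElem?_eq_getElem (by simp; omega)] at h9
    exact Option.some.inj h9
  rw [hget]
  cases t with
  | zero => simpa using hd
  | succ t' =>
    simp only [List.getElem_cons_succ]
    exact pvTakeWhile_pred pvDg l t' (by omega)

-- the head of the remainder after a digit run is not a digit
theorem pvRestHead (l : List String) (c' : String) (l'' : List String)
    (h : l.dropWhile pvDg = c' :: l'') : pvDg c' = false := by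
  have := List.head?_dropWhile_not pvDg l
  rw [h] at this
  simpa using this

-- ===== B-side: the starts filter lists the run starts =====
set_option maxHeartbeats 1000000 in
theorem pvStarts (row : List String) : ∀ (m : Nat) (suf : List String) (i : Nat),
    suf.length ≤ m → row.drop i = suf → i ≤ row.length →
    (i = 0 ∨ pvIsdAt (row.map (fun c => PySem.Str.strIsdigit c)) ((i : Int) - 1) = false ∨
      (∀ c l, suf = c :: l → pvDg c = false)) →
    (PySem.List.pyRange (i : Int) (row.length : Int) 1).filter
        (fun j => pvIsdAt (row.map (fun c => PySem.Str.strIsdigit c)) j &&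
          (j == 0 || !pvIsdAt (row.map (fun c => PySem.Str.strIsdigit c)) (j - 1)))
      = (pvRuns suf (i : Int)).map (fun r => r.2.1) := by
  intro m
  induction m with
  | zero =>
    intro suf i hm hdrop hle _
    have hsuf : suf = [] := List.length_eq_zero_iff.mp (by omega)
    subst hsuf
    have : i = row.length := by have := List.drop_eq_nil_iff.mp hdrop; omega
    rw [PySem.List.pyRange_one_eq_nil (by omega), pvRuns]
    rfl
  | succ m ihm =>
    intro suf i hm hdrop hle hinv
    cases suf with
    | nil =>
      have : i = row.length := by have := List.drop_eq_nil_iff.mp hdrop; omega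
      rw [PySem.List.pyRange_one_eq_nil (by omega), pvRuns]
      rfl
    | cons c l =>
      have hlen : (c :: l).length = row.length - i := by rw [← hdrop, List.length_drop]
      have hlt : i < row.length := by simp at hlen; omega
      cases hd : pvDg c
      · -- non-digit head: the filter drops index i
        have hi : pvIsdAt (row.map (fun c => PySem.Str.strIsdigit c)) (i : Int) = false := by
          rw [pvIsdAt_lt row i hlt, pvGetOfDrop row i c l hdrop hlt, hd]
        rw [PySem.List.pyRange_one_cons (by exact_mod_cast hlt)]
        rw [List.filter_cons_of_neg (by simp only [hi, Bool.false_and]; simp)]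
        have hdrop' : row.drop (i + 1) = l := by rw [← List.tail_drop, hdrop]; rfl
        have := ihm l (i + 1) (by simp at hm; omega) hdrop' (by omega)
          (Or.inr (Or.inl (by push_cast; simpa using hi)))
        push_cast at this ⊢
        rw [this, pvRuns]
        simp [hd]
      · -- digit head: index i passes, the run interior is peeled, recurse after the run
        set isd := row.map (fun c => PySem.Str.strIsdigit c) with hisd
        set k := (l.takeWhile pvDg).length with hk
        have hkl := pvTakeWhile_len_le pvDg l
        have hkn : i + k < row.length := by simp at hlen; omega
        have hpi : pvIsdAt isd (i : Int) = true := by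
          have := pvRunDigit row i c l hdrop hd 0 (by omega)
          simpa using this
        have hstart : ((i : Int) == 0 || !pvIsdAt isd ((i : Int) - 1)) = true := by
          rcases hinv with h0 | hprev | hhd
          · subst h0; simp
          · simp [hprev]
          · exact absurd (hhd c l rfl) (by simp [hd])
        rw [PySem.List.pyRange_one_cons (by exact_mod_cast hlt)]
        rw [List.filter_cons_of_pos (by simp only [hpi, hstart]; rfl)]
        -- peel the k interior positions i+1 .. i+k
        have hpeel := pvPeel
          (fun j => pvIsdAt isd j && ((j == 0) || !pvIsdAt isd (j - 1))) k ((i : Int) + 1) (row.length : Int)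
          (fun t ht => by
            have h1 : pvIsdAt isd (((i + (t + 1) : Nat) : Int)) = true :=
              pvRunDigit row i c l hdrop hd (t + 1) (by omega)
            have h2 : pvIsdAt isd (((i + t : Nat) : Int)) = true :=
              pvRunDigit row i c l hdrop hd t (by omega)
            show (pvIsdAt isd ((i : Int) + 1 + (t : Int)) &&
                (((i : Int) + 1 + (t : Int)) == 0 || !pvIsdAt isd (((i : Int) + 1 + (t : Int)) - 1))) = false
            rw [show (i : Int) + 1 + (t : Int) = ((i + (t + 1) : Nat) : Int) from by push_cast; ring, h1,
              show ((i + (t + 1) : Nat) : Int) - 1 = ((i + t : Nat) : Int) from by push_cast; ring, h2]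
            simp only [Bool.true_and, Bool.not_true, Bool.or_false]
            exact beq_eq_false_iff_ne.mpr (by push_cast; omega))
        rw [hpeel]
        -- recurse on the remainder
        have hdrop2 : row.drop (i + 1 + k) = l.dropWhile pvDg := by
          rw [pvDropWhile_eq_drop pvDg l, ← hk]
          rw [show i + 1 + k = i + (1 + k) from by ring, ← List.drop_drop, hdrop]
          simp [Nat.add_comm]
        have hinv' : (i + 1 + k = 0 ∨ pvIsdAt isd (((i + 1 + k : Nat) : Int) - 1) = false ∨
            (∀ c' l'', l.dropWhile pvDg = c' :: l'' → pvDg c' = false)) :=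
          Or.inr (Or.inr (fun c' l'' h => pvRestHead l c' l'' h))
        have hrec := ihm (l.dropWhile pvDg) (i + 1 + k)
          (by
            have := List.length_dropWhile_le (p := pvDg) (l := l)
            simp at hm
            omega)
          hdrop2 (by omega) hinv'
        have he3 : (i : Int) + 1 + (k : Int) = ((i + 1 + k : Nat) : Int) := by push_cast; ring
        rw [he3, hrec, pvRuns]
        simp only [hd, if_pos, List.map_cons, ← hk]
        congr 2
        push_cast
        ring

-- ===== B-side: the ends filter lists the run ends =====
set_option maxHeartbeats 1000000 in
theorem pvEnds (row : List String) : ∀ (m : Nat) (suf : List String) (i : Nat),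
    suf.length ≤ m → row.drop i = suf → i ≤ row.length →
    (PySem.List.pyRange (i : Int) (row.length : Int) 1).filter
        (fun j => pvIsdAt (row.map (fun c => PySem.Str.strIsdigit c)) j &&
          (j == (row.length : Int) - 1 || !pvIsdAt (row.map (fun c => PySem.Str.strIsdigit c)) (j + 1)))
      = (pvRuns suf (i : Int)).map (fun r => r.2.2) := by
  intro m
  induction m with
  | zero =>
    intro suf i hm hdrop hle
    have hsuf : suf = [] := List.length_eq_zero_iff.mp (by omega)
    subst hsuf
    have : i = row.length := by have := List.drop_eq_nil_iff.mp hdrop; omega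
    rw [PySem.List.pyRange_one_eq_nil (by omega), pvRuns]
    rfl
  | succ m ihm =>
    intro suf i hm hdrop hle
    cases suf with
    | nil =>
      have : i = row.length := by have := List.drop_eq_nil_iff.mp hdrop; omega
      rw [PySem.List.pyRange_one_eq_nil (by omega), pvRuns]
      rfl
    | cons c l =>
      have hlen : (c :: l).length = row.length - i := by rw [← hdrop, List.length_drop]
      have hlt : i < row.length := by simp at hlen; omega
      have hdrop' : row.drop (i + 1) = l := by rw [← List.tail_drop, hdrop]; rfl
      cases hd : pvDg c
      · -- non-digit head
        have hi : pvIsdAt (row.map (fun c => PySem.Str.strIsdigit c)) (i : Int) = false := by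
          rw [pvIsdAt_lt row i hlt, pvGetOfDrop row i c l hdrop hlt, hd]
        rw [PySem.List.pyRange_one_cons (by exact_mod_cast hlt)]
        rw [List.filter_cons_of_neg (by simp only [hi, Bool.false_and]; simp)]
        have := ihm l (i + 1) (by simp at hm; omega) hdrop' (by omega)
        push_cast at this ⊢
        rw [this, pvRuns]
        simp [hd]
      · -- digit head: peel the k interior positions i .. i+k-1, keep i+k, recurse
        set isd := row.map (fun c => PySem.Str.strIsdigit c) with hisd
        set k := (l.takeWhile pvDg).length with hk
        have hkl := pvTakeWhile_len_le pvDg l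
        have hkn : i + k < row.length := by simp at hlen; omega
        have hpeel := pvPeel
          (fun j => pvIsdAt isd j && ((j == (row.length : Int) - 1) || !pvIsdAt isd (j + 1))) k
          (i : Int) (row.length : Int)
          (fun t ht => by
            have h1 : pvIsdAt isd (((i + t : Nat) : Int)) = true :=
              pvRunDigit row i c l hdrop hd t (by omega)
            have h2 : pvIsdAt isd (((i + (t + 1) : Nat) : Int)) = true :=
              pvRunDigit row i c l hdrop hd (t + 1) (by omega)
            show (pvIsdAt isd ((i : Int) + (t : Int)) &&
                (((i : Int) + (t : Int)) == (row.length : Int) - 1 || !pvIsdAt isd (((i : Int) + (t : Int)) + 1))) = false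
            rw [show (i : Int) + (t : Int) = ((i + t : Nat) : Int) from by push_cast; ring, h1,
              show ((i + t : Nat) : Int) + 1 = ((i + (t + 1) : Nat) : Int) from by push_cast; ring, h2]
            simp only [Bool.true_and, Bool.not_true, Bool.or_false]
            exact beq_eq_false_iff_ne.mpr (by push_cast; omega))
        rw [hpeel]
        -- position i+k is the run end
        have hpk : pvIsdAt isd (((i + k : Nat) : Int)) = true :=
          pvRunDigit row i c l hdrop hd k (by omega)
        have hdrop2 : row.drop (i + 1 + k) = l.dropWhile pvDg := by
          rw [pvDropWhile_eq_drop pvDg l, ← hk]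
          rw [show i + 1 + k = i + (1 + k) from by ring, ← List.drop_drop, hdrop]
          simp [Nat.add_comm]
        have hend : (((i + k : Nat) : Int) == (row.length : Int) - 1 ||
            !pvIsdAt isd (((i + k : Nat) : Int) + 1)) = true := by
          by_cases hL : i + k + 1 = row.length
          · have hbeq : (((i + k : Nat) : Int) == (row.length : Int) - 1) = true :=
              beq_iff_eq.mpr (by push_cast; omega)
            rw [hbeq, Bool.true_or]
          · have hkn2 : i + k + 1 < row.length := by omega
            cases hrest : l.dropWhile pvDg with
            | nil =>
              exfalso
              have : row.drop (i + 1 + k) = [] := by rw [hdrop2, hrest]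
              have := List.drop_eq_nil_iff.mp this
              omega
            | cons c' l'' =>
              have hc' : pvDg c' = false := pvRestHead l c' l'' hrest
              have hnext : pvIsdAt isd (((i + k + 1 : Nat) : Int)) = false := by
                rw [hisd, pvIsdAt_lt row (i + k + 1) hkn2]
                have hdrop3 : row.drop (i + k + 1) = c' :: l'' := by
                  rw [show i + k + 1 = i + 1 + k from by ring, hdrop2, hrest]
                rw [pvGetOfDrop row (i + k + 1) c' l'' hdrop3 hkn2, hc']
              have he : ((i + k : Nat) : Int) + 1 = ((i + k + 1 : Nat) : Int) := by push_cast; ring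
              rw [he, hnext]
              rw [Bool.not_false, Bool.or_true]
        have hcons : (i : Int) + (k : Int) = ((i + k : Nat) : Int) := by push_cast; ring
        rw [hcons, PySem.List.pyRange_one_cons (by exact_mod_cast hkn)]
        rw [List.filter_cons_of_pos (by simp only [hpk, hend]; rfl)]
        have hrec := ihm (l.dropWhile pvDg) (i + 1 + k)
          (by
            have := List.length_dropWhile_le (p := pvDg) (l := l)
            simp at hm
            omega)
          hdrop2 (by omega)
        have he3 : ((i + k : Nat) : Int) + 1 = ((i + 1 + k : Nat) : Int) := by push_cast; ring
        rw [he3, hrec, pvRuns]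
        simp only [hd, if_pos, List.map_cons, ← hk]
        congr 2
        push_cast
        ring

-- ===== B-side: slicing each run back out of the row reproduces its number =====
set_option maxHeartbeats 1000000 in
theorem pvSliceMap (row : List String) : ∀ (m : Nat) (suf : List String) (i : Nat),
    suf.length ≤ m → row.drop i = suf →
    (pvRuns suf (i : Int)).map
        (fun r => (pvNum (PySem.List.slice row (some r.2.1) (some (r.2.2 + 1))), r.2))
      = pvRuns suf (i : Int) := by
  intro m
  induction m with
  | zero =>
    intro suf i hm _
    have hsuf : suf = [] := List.length_eq_zero_iff.mp (by omega)
    subst hsuf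
    rw [pvRuns]
    rfl
  | succ m ihm =>
    intro suf i hm hdrop
    cases suf with
    | nil => rw [pvRuns]; rfl
    | cons c l =>
      have hdrop' : row.drop (i + 1) = l := by rw [← List.tail_drop, hdrop]; rfl
      cases hd : pvDg c
      · rw [pvRuns]
        simp only [hd, if_neg, Bool.false_eq_true, not_false_iff]
        have := ihm l (i + 1) (by simp at hm; omega) hdrop'
        push_cast at this ⊢
        exact this
      · rw [pvRuns]
        simp only [hd, if_pos, List.map_cons]
        set k := (l.takeWhile pvDg).length with hk
        have hdrop2 : row.drop (i + 1 + k) = l.dropWhile pvDg := by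
          rw [pvDropWhile_eq_drop pvDg l, ← hk]
          rw [show i + 1 + k = i + (1 + k) from by ring, ← List.drop_drop, hdrop]
          simp [Nat.add_comm]
        rw [List.cons_eq_cons]
        constructor
        · -- the head run's slice
          have hslice := pvSliceRun row i c l hdrop
          simp only [← hk] at hslice
          rw [hslice]
        · have hrec := ihm (l.dropWhile pvDg) (i + 1 + k)
            (by
              have := List.length_dropWhile_le (p := pvDg) (l := l)
              simp at hm
              omega)
            hdrop2
          have he : (i : Int) + (k : Int) + 1 = ((i + 1 + k : Nat) : Int) := by push_cast; ring
          rw [he, hrec]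

set_option maxHeartbeats 1000000 in
theorem pvB_eq_runs (row : List String) :
    extract_numbers_and_bounds_alt row = pvRuns row 0 := by
  unfold extract_numbers_and_bounds_alt
  have h0 : ((0 : Nat) : Int) = (0 : Int) := rfl
  have hstarts := pvStarts row row.length row 0 (by omega) (by simp) (by omega) (Or.inl rfl)
  have hends := pvEnds row row.length row 0 (by omega) (by simp) (by omega)
  rw [h0] at hstarts hends
  simp only [hstarts, hends, List.zip_map', List.map_map]
  have hmap := pvSliceMap row row.length row 0 (by omega) (by simp)
  rw [h0] at hmap
  conv_rhs => rw [← hmap]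
  apply List.map_congr_left
  intro r _
  rfl

-- ===== VERDICT (by name: the statement is the Claim_ definition above) =====
theorem extract_numbers_and_bounds_spec : Claim_equal_extract_numbers_and_bounds := by
  intro row _
  unfold Spec_extract_numbers_and_bounds
  rw [pvA_eq_runs, pvB_eq_runs]
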